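-- pv_equiv track=rewrite | github.com/ljunker/project-euler-solutions | euler-0011.py | diagonal_reverse
-- ===== SOURCE A (Python) =====
-- def diagonal_reverse(grid, run_len):
--     max_prod = 0
--     n, m = len(grid), len(grid[0])
--     for i in range(run_len - 1, n):
--         for j in range(m - run_len + 1):
--             product = 1
--             for k in range(run_len):
--                 product *= grid[i - k][j + k]
--             max_prod = max(max_prod, product)
--     return max_prod
-- ===== SOURCE B (Python) =====
-- def diagonal_reverse(grid, run_len):
--     n, m = len(grid), len(grid[0])
--     width = m - run_len + 1
--     best = 0
--     for i in range(run_len - 1, n):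
--         vals = [1] * width
--         for k in range(run_len):
--             row = grid[i - k]
--             vals = [v * x for v, x in zip(vals, row[k:k + width])]
--         if vals:
--             best = max(best, max(vals))
--     return best
-- ===== Notes on version B (the rewrite author's own statement) =====
-- stated objective: alternative
-- what changed: B replaces A's per-window innermost product loop by per-row vector accumulation: for each eligible row it builds the whole row of diagonal-window products at once by elementwise-multiplying run_len shifted row slices, then takes one max of that row.
import Mathlib
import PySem

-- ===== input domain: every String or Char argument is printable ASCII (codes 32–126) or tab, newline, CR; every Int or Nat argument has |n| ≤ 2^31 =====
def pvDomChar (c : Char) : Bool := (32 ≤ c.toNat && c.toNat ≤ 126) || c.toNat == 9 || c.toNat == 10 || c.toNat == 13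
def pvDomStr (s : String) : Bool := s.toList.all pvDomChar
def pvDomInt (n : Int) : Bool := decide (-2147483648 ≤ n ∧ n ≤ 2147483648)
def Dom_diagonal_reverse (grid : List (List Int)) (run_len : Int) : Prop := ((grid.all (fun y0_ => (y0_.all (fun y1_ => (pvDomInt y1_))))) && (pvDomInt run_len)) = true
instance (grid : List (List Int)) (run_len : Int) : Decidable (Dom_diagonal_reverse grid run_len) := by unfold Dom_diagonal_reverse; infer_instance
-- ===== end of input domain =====

-- B changes the traversal: per-row vector accumulation of all window products (elementwise
-- products of run_len shifted row slices) instead of A's per-window innermost product loop.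

-- ===== PORT A =====
-- grid[i-k][j+k] is ported with pyGet?;  the '.getD' defaults are never used under Pre_
-- (grid[0] raises IndexError on an empty grid; out-of-range cell accesses raise IndexError).
def diagonal_reverse (grid : List (List Int)) (run_len : Int) : Int :=
  let n : Int := grid.length
  let m : Int := (((PySem.List.pyGet? grid 0).getD []).length : Int)
  (PySem.List.pyRange (run_len - 1) n 1).foldl (fun max_prod i =>
    (PySem.List.pyRange 0 (m - run_len + 1) 1).foldl (fun max_prod j =>
      let product : Int :=
        (PySem.List.pyRange 0 run_len 1).foldl (fun product k =>
          product * ((PySem.List.pyGet? ((PySem.List.pyGet? grid (i - k)).getD []) (j + k)).getD 0)) 1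
      max max_prod product) max_prod) 0

-- ===== PORT B =====
def diagonal_reverse_alt (grid : List (List Int)) (run_len : Int) : Int :=
  let n : Int := grid.length
  let m : Int := (((PySem.List.pyGet? grid 0).getD []).length : Int)
  let width : Int := m - run_len + 1
  (PySem.List.pyRange (run_len - 1) n 1).foldl (fun best i =>
    let vals : List Int :=
      (PySem.List.pyRange 0 run_len 1).foldl (fun vals k =>
        let row := (PySem.List.pyGet? grid (i - k)).getD []
        ((vals.zip (PySem.List.slice row (some k) (some (k + width)))).map
          (fun p => p.1 * p.2))) (List.replicate width.toNat 1)
    match PySem.List.max? vals (fun x => x) with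
    | none => best
    | some mx => max best mx) 0

-- ===== PRECONDITION & SPEC =====
-- Pre_ is exactly the inputs on which A returns: a nonempty grid (else grid[0] raises
-- IndexError) and every accessed cell grid[i-k][j+k] in range (else that access raises
-- IndexError); the quantifiers range over exactly A's loop index ranges (for run_len ≤ 0
-- no cell is ever accessed, so only grid ≠ [] is needed).
def Pre_diagonal_reverse (grid : List (List Int)) (run_len : Int) : Prop :=
  grid ≠ [] ∧
  (1 ≤ run_len →
  ∀ i ∈ PySem.List.pyRange (run_len - 1) (grid.length : Int) 1,
    ∀ j ∈ PySem.List.pyRange 0 ((((PySem.List.pyGet? grid 0).getD []).length : Int) - run_len + 1) 1,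
      ∀ k ∈ PySem.List.pyRange 0 run_len 1,
        j + k < (((PySem.List.pyGet? grid (i - k)).getD []).length : Int))
instance (grid : List (List Int)) (run_len : Int) : Decidable (Pre_diagonal_reverse grid run_len) := by
  unfold Pre_diagonal_reverse; infer_instance
def pvWitness_diagonal_reverse : List (List Int) × Int := ([[1, 2], [3, 4]], 2)

def Spec_diagonal_reverse (grid : List (List Int)) (run_len : Int) (out : Int) : Prop := out = diagonal_reverse_alt grid run_len
instance (grid : List (List Int)) (run_len : Int) (out : Int) : Decidable (Spec_diagonal_reverse grid run_len out) := by unfold Spec_diagonal_reverse; infer_instance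

-- ===== CLAIM (what is proved, stated in full; the proofs are below) =====
def Claim_equal_diagonal_reverse : Prop := ∀ (grid : List (List Int)) (run_len : Int), Dom_diagonal_reverse grid run_len → Pre_diagonal_reverse grid run_len → Spec_diagonal_reverse grid run_len (diagonal_reverse grid run_len)

-- ===== LEMMAS AND PROOFS =====

-- zip of two maps over the same list, multiplied
theorem zip_map_mul {α : Type} (r : List α) (G F : α → Int) :
    ((r.map G).zip (r.map F)).map (fun p => p.1 * p.2) = r.map (fun j => G j * F j) := by
  induction r with
  | nil => rfl
  | cons x t ih => simp [ih]

-- pull a max out of a foldl max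
theorem foldl_max_pull (t : List Int) (a b : Int) :
    t.foldl max (max a b) = max a (t.foldl max b) := by
  induction t generalizing b with
  | nil => rfl
  | cons x t ih => simp only [List.foldl_cons, max_assoc, ih]

-- running max over a list equals Python's max(xs) folded once with the accumulator
theorem foldl_max_match (xs : List Int) (acc : Int) :
    xs.foldl max acc =
      (match PySem.List.max? xs (fun x => x) with
       | none => acc
       | some mx => max acc mx) := by
  cases xs with
  | nil => rfl
  | cons x t =>
    rw [PySem.List.max?_id_cons]
    simpa using foldl_max_pull t acc x

-- the vector-accumulation loop computes, pointwise, A's per-window products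
theorem vals_eq_map (ks : List Int) (width : Int) (F : Int → Int → Int) (G : Int → Int)
    (S : Int → List Int)
    (hS : ∀ k ∈ ks, S k = (PySem.List.pyRange 0 width 1).map (fun j => F k j)) :
    ks.foldl (fun vals k => ((vals.zip (S k)).map (fun p => p.1 * p.2)))
        ((PySem.List.pyRange 0 width 1).map G)
      = (PySem.List.pyRange 0 width 1).map
          (fun j => ks.foldl (fun p k => p * F k j) (G j)) := by
  induction ks generalizing G with
  | nil => rfl
  | cons k ks ih =>
    simp only [List.foldl_cons]
    rw [hS k (List.mem_cons_self ..), zip_map_mul,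
        ih (fun j => G j * F k j) (fun k hk => hS k (List.mem_cons_of_mem _ hk))]

theorem replicate_eq_map_range (width : Int) :
    List.replicate width.toNat (1 : Int)
      = (PySem.List.pyRange 0 width 1).map (fun _ => (1 : Int)) := by
  rw [eq_comm, List.eq_replicate_iff]
  constructor
  · simp [PySem.List.length_pyRange_one]
  · intro b hb
    simp only [List.mem_map] at hb
    obtain ⟨_, _, h⟩ := hb
    omega

-- A's running-max loop over window products, phrased through Python's max of the mapped list
theorem foldl_maxP (P : Int → Int) (acc : Int) (js : List Int) :
    js.foldl (fun a j => max a (P j)) acc =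
      (match PySem.List.max? (js.map P) (fun x => x) with
       | none => acc
       | some mx => max acc mx) := by
  rw [← foldl_max_match, List.foldl_map]

-- the accumulation loop maps the empty vector to the empty vector
theorem foldl_zip_nil {α : Type} (ks : List α) (S : α → List Int) :
    ks.foldl (fun vals k => ((vals.zip (S k)).map (fun p => p.1 * p.2))) ([] : List Int) = [] := by
  induction ks with
  | nil => rfl
  | cons k ks ih => simpa using ih

-- a full-length slice of a sufficiently long row, written as a map over column offsets
theorem slice_eq_map_range (row : List Int) (k width : Int)
    (hk : 0 ≤ k) (hwpos : 0 < width) (hlen : (k + width).toNat ≤ row.length) :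
    PySem.List.slice row (some k) (some (k + width))
      = (PySem.List.pyRange 0 width 1).map
          (fun j => (PySem.List.pyGet? row (j + k)).getD 0) := by
  rw [PySem.List.slice_toNat row hk (by omega)]
  apply List.ext_getElem
  · simp [PySem.List.length_pyRange_one]
    omega
  · intro t h1 h2
    have ht : t < width.toNat := by
      simp [PySem.List.length_pyRange_one] at h2; omega
    have hidx : k.toNat + t < row.length := by omega
    simp only [List.getElem_take, List.getElem_drop, List.getElem_map]
    rw [PySem.List.getElem_pyRange_one]
    have hin : 0 ≤ (0 : Int) + t + k := by omega
    have hlt : (0 : Int) + t + k < row.length := by omega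
    rw [PySem.List.pyGet?_eq_some_getElem row hin hlt]
    simp only [Option.getD_some]
    congr 1
    omega

theorem diagonal_reverse_spec : Claim_equal_diagonal_reverse := by
  intro grid run_len _hdom hpre
  obtain ⟨hne, hacc⟩ := hpre
  unfold Spec_diagonal_reverse diagonal_reverse diagonal_reverse_alt
  simp only
  apply PySem.List.foldl_congr_mem
  intro acc i hi
  rw [PySem.List.mem_pyRange_one] at hi
  set m : Int := (((PySem.List.pyGet? grid 0).getD []).length : Int) with hm
  set width : Int := m - run_len + 1 with hw
  -- A's inner loop as a running max over the mapped list of window products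
  rw [foldl_maxP (fun j => (PySem.List.pyRange 0 run_len 1).foldl (fun product k =>
          product * ((PySem.List.pyGet? ((PySem.List.pyGet? grid (i - k)).getD []) (j + k)).getD 0)) 1)
        acc (PySem.List.pyRange 0 width 1)]
  by_cases hwpos : 0 < width
  · -- every slice is full length: the vector loop computes exactly A's window products
    rw [replicate_eq_map_range,
        vals_eq_map (PySem.List.pyRange 0 run_len 1) width
          (fun k j => (PySem.List.pyGet? ((PySem.List.pyGet? grid (i - k)).getD []) (j + k)).getD 0)
          (fun _ => 1) _ ?_]
    intro k hk
    rw [PySem.List.mem_pyRange_one] at hk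
    have hik0 : 0 ≤ i - k := by omega
    have hikn : i - k < (grid.length : Int) := by omega
    -- Pre_ at the last window column j = width - 1 gives the needed row length
    have hj := hacc (by omega) i (PySem.List.mem_pyRange_one.mpr ⟨hi.1, hi.2⟩) (width - 1)
      (PySem.List.mem_pyRange_one.mpr ⟨by omega, by omega⟩) k
      (PySem.List.mem_pyRange_one.mpr ⟨hk.1, hk.2⟩)
    simp only [PySem.List.pyGet?_eq_some_getElem grid hik0 hikn, Option.getD_some] at hj ⊢
    exact slice_eq_map_range _ k width (by omega) hwpos (by omega)
  · -- no window fits in a row: both inner loops are vacuous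
    have hz : width.toNat = 0 := by omega
    have hr : PySem.List.pyRange 0 width 1 = [] := PySem.List.pyRange_one_eq_nil (by omega)
    rw [hz, List.replicate_zero, foldl_zip_nil, hr]
    rfl

-- ===== VERDICT (by name: the statement is the Claim_ definition above) =====
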